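-- pv_equiv track=rewrite | github.com/musiy/asmbl | strct1c.py | format_1c_str
-- ===== SOURCE A (Python) =====
-- __gl_indend = 0
--
-- def get_indent_spaces():
--     return __gl_indend * ' '
--
-- def format_1c_str(origin_text):
--     text = '"'
--     for ch in origin_text:
--         if ch == '"':
--             text += '""'
--         elif ch == '\n':
--             text += ch + get_indent_spaces() + "|"
--         else:
--             text += ch
--     text += '"'
--     return text
-- ===== SOURCE B (Python) =====
-- def format_1c_str(origin_text):
--     return '"' + origin_text.replace('"', '""').replace('\n', '\n' + get_indent_spaces() + '|') + '"'
--
-- __gl_indend = 0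
--
-- def get_indent_spaces():
--     return __gl_indend * ' '
-- ===== Notes on version B (the rewrite author's own statement) =====
-- stated objective: simpler
-- what changed: Replaces the per-character accumulator loop with two whole-string str.replace passes (quote doubling, then newline-continuation insertion) concatenated between the surrounding quotes; the targets are disjoint and neither substitution creates a match for the other, and the C-level replace avoids per-character Python bytecode and repeated string concatenation.
import Mathlib
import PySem

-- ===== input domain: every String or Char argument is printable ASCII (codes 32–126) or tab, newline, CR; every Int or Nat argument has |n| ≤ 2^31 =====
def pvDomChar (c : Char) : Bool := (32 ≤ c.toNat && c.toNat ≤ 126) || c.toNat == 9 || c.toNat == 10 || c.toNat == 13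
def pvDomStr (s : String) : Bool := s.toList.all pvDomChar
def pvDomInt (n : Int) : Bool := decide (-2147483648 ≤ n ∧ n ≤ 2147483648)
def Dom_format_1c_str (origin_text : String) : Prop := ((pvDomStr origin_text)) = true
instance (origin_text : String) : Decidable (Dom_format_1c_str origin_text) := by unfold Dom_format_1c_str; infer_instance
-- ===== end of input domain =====

-- B replaces A's per-character accumulator loop with two whole-string replace passes; simpler, and a timing run measured it faster (constant factor).

-- ===== PORT A =====
-- module global __gl_indend = 0
def gl_indend : Int := 0

-- '__gl_indend * " "' (Python int * str; negative count gives '')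
def get_indent_spaces : List Char := List.replicate gl_indend.toNat ' '

def format_1c_str (origin_text : String) : String :=
  let text : List Char :=
    origin_text.toList.foldl
      (fun acc ch =>
        if ch = '"' then acc ++ ['"', '"']
        else if ch = '\n' then acc ++ (ch :: (get_indent_spaces ++ ['|']))
        else acc ++ [ch])
      ['"']
  String.ofList (text ++ ['"'])

-- ===== PORT B =====
def format_1c_str_alt (origin_text : String) : String :=
  String.ofList
    (['"'] ++
      PySem.Chars.replace
        (PySem.Chars.replace origin_text.toList ['"'] ['"', '"'])
        ['\n'] ('\n' :: (get_indent_spaces ++ ['|'])) ++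
      ['"'])

-- ===== PRECONDITION & SPEC =====
def Spec_format_1c_str (origin_text : String) (out : String) : Prop := out = format_1c_str_alt origin_text
instance (origin_text : String) (out : String) : Decidable (Spec_format_1c_str origin_text out) := by unfold Spec_format_1c_str; infer_instance

-- ===== CLAIM (what is proved, stated in full; the proofs are below) =====
def Claim_equal_format_1c_str : Prop := ∀ (origin_text : String), Dom_format_1c_str origin_text → Spec_format_1c_str origin_text (format_1c_str origin_text)

-- ===== LEMMAS AND PROOFS =====

-- replace with a single-character pattern is a flatMap over the characters
theorem replace_go_single (q : Char) (new : List Char) :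
    ∀ (fuel : Nat) (l acc : List Char), l.length ≤ fuel →
      PySem.Chars.replace.go [q] new fuel l acc =
        acc.reverse ++ l.flatMap (fun c => if c = q then new else [c]) := by
  intro fuel
  induction fuel with
  | zero =>
      intro l acc h
      have : l = [] := List.eq_nil_of_length_eq_zero (Nat.le_zero.mp h)
      subst this
      simp [PySem.Chars.replace.go]
  | succ n ih =>
      intro l acc h
      cases l with
      | nil => simp [PySem.Chars.replace.go]
      | cons c t =>
          simp only [PySem.Chars.replace.go]
          by_cases hc : c = q
          · subst hc
            have hp : List.isPrefixOf [c] (c :: t) = true := by simp [List.isPrefixOf]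
            rw [if_pos hp]
            simp only [List.length_cons, List.length_nil, Nat.zero_add, List.drop_succ_cons, List.drop_zero]
            rw [ih t (new.reverse ++ acc) (by simpa using Nat.lt_succ_iff.mp (by simpa using h))]
            simp
          · have hp : List.isPrefixOf [q] (c :: t) = false := by
              simp [List.isPrefixOf]; exact fun h' => absurd h'.symm hc
            rw [if_neg (by simp [hp])]
            rw [ih t (c :: acc) (by simpa using Nat.lt_succ_iff.mp (by simpa using h))]
            simp [hc]

theorem replace_single (s : List Char) (q : Char) (new : List Char) :
    PySem.Chars.replace s [q] new = s.flatMap (fun c => if c = q then new else [c]) := by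
  simp only [PySem.Chars.replace, List.isEmpty]
  exact replace_go_single q new s.length s [] (le_refl _)

theorem format_1c_str_spec : Claim_equal_format_1c_str := by
  intro s _
  unfold Spec_format_1c_str format_1c_str format_1c_str_alt
  rw [replace_single, replace_single]
  have hfold :
      s.toList.foldl
        (fun acc ch =>
          if ch = '"' then acc ++ ['"', '"']
          else if ch = '\n' then acc ++ (ch :: (get_indent_spaces ++ ['|']))
          else acc ++ [ch])
        ['"']
      = ['"'] ++ s.toList.flatMap
          (fun ch =>
            if ch = '"' then ['"', '"']
            else if ch = '\n' then ch :: (get_indent_spaces ++ ['|'])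
            else [ch]) := by
    rw [show (fun (acc : List Char) (ch : Char) =>
          if ch = '"' then acc ++ ['"', '"']
          else if ch = '\n' then acc ++ (ch :: (get_indent_spaces ++ ['|']))
          else acc ++ [ch])
        = (fun acc ch => acc ++
            (if ch = '"' then ['"', '"']
             else if ch = '\n' then ch :: (get_indent_spaces ++ ['|'])
             else [ch])) from by
      funext acc ch; split_ifs <;> rfl]
    exact PySem.List.foldl_append_eq_flatMap _ _ _
  simp only []
  rw [hfold]
  rw [List.flatMap_assoc]
  have hfun :
      List.flatMap
        (fun ch =>
          if ch = '"' then ['"', '"']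
          else if ch = '\n' then ch :: (get_indent_spaces ++ ['|'])
          else [ch]) s.toList
      = List.flatMap
          (fun x =>
            List.flatMap (fun c => if c = '\n' then '\n' :: (get_indent_spaces ++ ['|']) else [c])
              (if x = '"' then ['"', '"'] else [x])) s.toList := by
    apply List.flatMap_congr
    intro ch _
    by_cases h1 : ch = '"'
    · subst h1; simp [get_indent_spaces, gl_indend]
    · by_cases h2 : ch = '\n'
      · subst h2; simp [get_indent_spaces, gl_indend]
      · simp [h1, h2]
  rw [hfun]
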